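-- pv_equiv track=rewrite | github.com/BlakeCalkins/OIT_Coding_Challenge_Fall | tic_tac_toe.py | coords_occupied
-- ===== SOURCE A (Python) =====
-- def coords_occupied(grid, tuple_coords):
--     # Checks if given coordinates on the grid are already occupied with an 'X' or 'O'
--     inrow, incolumn = tuple_coords
--     for row in range(len(grid)):
--         for column in range(len(grid[row])):
--             if row == inrow and column == incolumn:
--                 if grid[row][column] != '.':
--                     return True
--     return False
-- ===== SOURCE B (Python) =====
-- def coords_occupied(grid, tuple_coords):
--     inrow, incolumn = tuple_coords
--     if 0 <= inrow < len(grid) and 0 <= incolumn < len(grid[inrow]):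
--         return grid[inrow][incolumn] != '.'
--     return False
-- ===== Notes on version B (the rewrite author's own statement) =====
-- stated objective: simpler
-- what changed: Replaced the nested scan over every grid cell looking for the target coordinate with an explicit bounds check followed by one direct lookup.
import Mathlib
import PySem

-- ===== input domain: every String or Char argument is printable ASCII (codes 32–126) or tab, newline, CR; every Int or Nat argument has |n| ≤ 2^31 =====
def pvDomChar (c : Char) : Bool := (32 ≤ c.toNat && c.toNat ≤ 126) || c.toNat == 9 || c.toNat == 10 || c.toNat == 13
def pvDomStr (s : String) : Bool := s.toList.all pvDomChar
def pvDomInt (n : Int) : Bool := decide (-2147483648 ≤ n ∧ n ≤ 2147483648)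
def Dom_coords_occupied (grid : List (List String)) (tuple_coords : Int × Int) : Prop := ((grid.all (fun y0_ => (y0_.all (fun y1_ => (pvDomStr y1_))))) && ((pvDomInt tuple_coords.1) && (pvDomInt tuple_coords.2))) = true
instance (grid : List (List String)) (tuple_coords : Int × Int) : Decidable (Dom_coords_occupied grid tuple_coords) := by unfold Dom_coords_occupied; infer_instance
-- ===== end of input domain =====

-- ===== PORT A =====
-- A scans every cell of the grid and returns True at the (matching) coordinate if it is not '.'.
def coords_occupied (grid : List (List String)) (tuple_coords : Int × Int) : Bool :=
  let inrow := tuple_coords.1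
  let incolumn := tuple_coords.2
  (List.range grid.length).any (fun row =>
    (List.range (grid.getD row []).length).any (fun column =>
      decide ((row : Int) = inrow ∧ (column : Int) = incolumn) &&
      decide ((grid.getD row []).getD column "" ≠ ".")))

-- ===== PORT B =====
-- B: bounds check, then one direct lookup instead of scanning every cell.
def coords_occupied_alt (grid : List (List String)) (tuple_coords : Int × Int) : Bool :=
  let inrow := tuple_coords.1
  let incolumn := tuple_coords.2
  if 0 ≤ inrow ∧ inrow < (grid.length : Int) then
    let row := grid.getD inrow.toNat []
    if 0 ≤ incolumn ∧ incolumn < (row.length : Int) then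
      decide (row.getD incolumn.toNat "" ≠ ".")
    else false
  else false

-- ===== PRECONDITION & SPEC =====
def Spec_coords_occupied (grid : List (List String)) (tuple_coords : Int × Int) (out : Bool) : Prop := out = coords_occupied_alt grid tuple_coords
instance (grid : List (List String)) (tuple_coords : Int × Int) (out : Bool) : Decidable (Spec_coords_occupied grid tuple_coords out) := by unfold Spec_coords_occupied; infer_instance

-- ===== CLAIM (what is proved, stated in full; the proofs are below) =====
def Claim_equal_coords_occupied : Prop := ∀ (grid : List (List String)) (tuple_coords : Int × Int), Dom_coords_occupied grid tuple_coords → Spec_coords_occupied grid tuple_coords (coords_occupied grid tuple_coords)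

-- ===== LEMMAS AND PROOFS =====

-- ===== VERDICT (by name: the statement is the Claim_ definition above) =====
theorem coords_occupied_spec : Claim_equal_coords_occupied := by
  intro grid tc _
  unfold Spec_coords_occupied coords_occupied coords_occupied_alt
  obtain ⟨ir, ic⟩ := tc
  rcases Bool.eq_false_or_eq_true ((List.range grid.length).any (fun row =>
    (List.range (grid.getD row []).length).any (fun column =>
      decide ((row : Int) = ir ∧ (column : Int) = ic) &&
      decide ((grid.getD row []).getD column "" ≠ ".")))) with h | h
  · -- the scan found an occupied matching cell
    rw [h]
    simp only [List.any_eq_true, List.mem_range, Bool.and_eq_true, decide_eq_true_eq] at h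
    obtain ⟨row, hrow, column, hcol, ⟨hri, hci⟩, hne⟩ := h
    have h1 : 0 ≤ ir ∧ ir < (grid.length : Int) := by omega
    rw [if_pos h1]
    have hrt : ir.toNat = row := by omega
    rw [hrt]
    have h2 : 0 ≤ ic ∧ ic < ((grid.getD row []).length : Int) := by omega
    rw [if_pos h2]
    have hct : ic.toNat = column := by omega
    rw [hct]
    simpa using hne
  · -- the scan found nothing: either out of bounds or the cell is '.'
    rw [h]
    simp only [List.any_eq_false, List.mem_range] at h
    dsimp only
    split_ifs with h1 h2
    · obtain ⟨h1a, h1b⟩ := h1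
      obtain ⟨h2a, h2b⟩ := h2
      have hr : ir.toNat < grid.length := by omega
      have h3 := h ir.toNat hr
      simp only [List.any_eq_true, List.mem_range, Bool.and_eq_true, decide_eq_true_eq,
        not_exists, not_and] at h3
      have hc : ic.toNat < (grid.getD ir.toNat []).length := by omega
      have h4 := h3 ic.toNat hc ⟨by omega, by omega⟩
      simp only [ne_eq, not_not] at h4
      simpa [List.getD] using h4
    · rfl
    · rfl
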